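-- pv_equiv track=rewrite | github.com/MusDev7/wtftp_plus | utils.py | generate_scales_idx
-- ===== SOURCE A (Python) =====
-- import math
--
-- def generate_scales_idx(length, level, halfLenFilter):
--     scales_idx = [0]
--     time_len = [length]
--     tmp = 0
--     for _ in range(level):
--         length = int(math.floor((length-1)/2) + halfLenFilter)
--         time_len.append(length)
--         tmp += length
--         scales_idx.append(tmp)
--     scales_idx.append(tmp+length)
--     return scales_idx, time_len
-- ===== SOURCE B (Python) =====
-- def generate_scales_idx(length, level, halfLenFilter):
--     # Closed form: with c = 2*halfLenFilter - 1 the recurrence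
--     # x_{k+1} = floor((x_k - 1)/2) + halfLenFilter = floor((x_k + c)/2)
--     # solves to x_k = ((length - c) >> k) + c, so every level's time length
--     # is computed directly from k, with no dependence on the previous level.
--     n = max(level, 0)            # range(level) iterates max(level, 0) times
--     c = 2 * halfLenFilter - 1
--     base = length - c
--     time_len = [(base >> k) + c for k in range(n + 1)]
--     scales_idx = [0]
--     for t in time_len[1:]:
--         scales_idx.append(scales_idx[-1] + t)
--     scales_idx.append(scales_idx[-1] + time_len[-1])
--     return scales_idx, time_len
-- ===== Notes on version B (the rewrite author's own statement) =====
-- stated objective: alternative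
-- what changed: A iterates the recurrence length = floor((length-1)/2)+halfLenFilter while accumulating a running sum in one interleaved loop; B replaces the recurrence entirely by the closed form time_len[k] = ((length-c) >> k) + c with c = 2*halfLenFilter-1 (each level computed directly from k, no dependence on the previous level), then derives scales_idx as prefix sums plus a duplicated last term.
import Mathlib
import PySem

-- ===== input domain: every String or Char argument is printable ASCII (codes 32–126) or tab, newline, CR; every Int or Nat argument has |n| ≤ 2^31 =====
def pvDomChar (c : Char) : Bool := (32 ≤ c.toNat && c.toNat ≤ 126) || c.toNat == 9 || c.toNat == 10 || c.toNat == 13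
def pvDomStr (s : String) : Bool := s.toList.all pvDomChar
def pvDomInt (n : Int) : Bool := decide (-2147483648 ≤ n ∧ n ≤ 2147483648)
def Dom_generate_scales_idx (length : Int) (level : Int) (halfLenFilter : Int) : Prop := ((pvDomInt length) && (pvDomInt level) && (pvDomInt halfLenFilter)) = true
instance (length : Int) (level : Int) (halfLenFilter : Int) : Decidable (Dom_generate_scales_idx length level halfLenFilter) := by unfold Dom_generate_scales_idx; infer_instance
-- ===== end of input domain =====

-- B replaces A's recurrence loop by the closed form time_len[k] = ((length-c) >> k) + c
-- with c = 2*halfLenFilter - 1, then takes prefix sums (alternative algorithm, same cost).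
-- In both ports Python's O(1) list.append is modelled by consing onto a reversed
-- accumulator that is reversed once at the end (the same list, evaluable in the interpreter).

-- ===== PORT A =====
-- loop body of A, on reversed accumulators (siR, tlR, tmp, length):
-- length = int(math.floor((length-1)/2) + halfLenFilter)  (exact as integer floor
-- division on the |n| ≤ 2^31 domain, where the float arithmetic is exact);
-- time_len.append(length); tmp += length; scales_idx.append(tmp)
def pvStepA (halfLenFilter : Int) (st : List Int × List Int × Int × Int) (_ : Int) :
    List Int × List Int × Int × Int :=
  let len' := PySem.Int.floordiv (st.2.2.2 - 1) 2 + halfLenFilter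
  ((st.2.2.1 + len') :: st.1, len' :: st.2.1, st.2.2.1 + len', len')

def generate_scales_idx (length : Int) (level : Int) (halfLenFilter : Int) : List Int × List Int :=
  let st := (PySem.List.pyRange 0 level 1).foldl (pvStepA halfLenFilter) ([0], [length], 0, length)
  (((st.2.2.1 + st.2.2.2) :: st.1).reverse, st.2.1.reverse)

-- ===== PORT B =====
-- loop body of B's prefix-sum pass: scales_idx.append(scales_idx[-1] + t);
-- the state is (scales_idx[-1], reversed scales_idx)
def pvStep2 (st : Int × List Int) (t : Int) : Int × List Int :=
  (st.1 + t, (st.1 + t) :: st.2)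

def generate_scales_idx_alt (length : Int) (level : Int) (halfLenFilter : Int) : List Int × List Int :=
  let n := max level 0
  let c := 2 * halfLenFilter - 1
  let base := length - c
  -- Python's 'base >> k' on ints (k ≥ 0 here) is exactly floor division by 2^k
  let time_len := (PySem.List.pyRange 0 (n + 1) 1).map
    (fun k => PySem.Int.floordiv base (2 ^ k.toNat) + c)
  let p := (PySem.List.slice time_len (some 1) none).foldl pvStep2 (0, [0])
  (((p.1 + PySem.List.pyGetD time_len (-1) 0) :: p.2).reverse, time_len)

-- ===== PRECONDITION & SPEC =====
def Spec_generate_scales_idx (length : Int) (level : Int) (halfLenFilter : Int) (out : List Int × List Int) : Prop := out = generate_scales_idx_alt length level halfLenFilter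
instance (length : Int) (level : Int) (halfLenFilter : Int) (out : List Int × List Int) : Decidable (Spec_generate_scales_idx length level halfLenFilter out) := by unfold Spec_generate_scales_idx; infer_instance

-- ===== CLAIM (what is proved, stated in full; the proofs are below) =====
def Claim_equal_generate_scales_idx : Prop := ∀ (length : Int) (level : Int) (halfLenFilter : Int), Dom_generate_scales_idx length level halfLenFilter → Spec_generate_scales_idx length level halfLenFilter (generate_scales_idx length level halfLenFilter)

-- ===== LEMMAS AND PROOFS =====

-- the closed form: value of the k-th level's length
def pvX (b c : Int) (k : Nat) : Int := PySem.Int.floordiv b (2 ^ k) + c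

-- the tail [x_1, ..., x_m] that B's prefix-sum pass consumes
def pvT (b c : Int) (m : Nat) : List Int := (List.range m).map (fun i => pvX b c (i + 1))

-- A's loop body, with the ignored element fixed
def pvStep1 (h : Int) (st : List Int × List Int × Int × Int) : List Int × List Int × Int × Int :=
  pvStepA h st 0

theorem pv_foldl_iter (h : Int) : ∀ (l : List Int) (s : List Int × List Int × Int × Int),
    l.foldl (pvStepA h) s = (pvStep1 h)^[l.length] s := by
  intro l
  induction l with
  | nil => intro s; rfl
  | cons a l ih =>
    intro s
    simp only [List.foldl_cons, List.length_cons, Function.iterate_succ_apply]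
    rw [ih]; rfl

-- closed-form step: floor((x_k - 1)/2) + h = x_{k+1}  where c = 2h - 1
theorem pv_closed_step (b h : Int) (k : Nat) :
    PySem.Int.floordiv (pvX b (2 * h - 1) k - 1) 2 + h = pvX b (2 * h - 1) (k + 1) := by
  unfold pvX
  rw [PySem.Int.floordiv_eq_ediv_of_pos (by norm_num : (0:Int) < 2),
      PySem.Int.floordiv_eq_ediv_of_pos (by positivity : (0:Int) < 2 ^ k),
      PySem.Int.floordiv_eq_ediv_of_pos (by positivity : (0:Int) < 2 ^ (k + 1))]
  have h1 : b / 2 ^ k + (2 * h - 1) - 1 = b / 2 ^ k + (h - 1) * 2 := by ring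
  rw [h1, Int.add_mul_ediv_right _ _ (by norm_num : (2:Int) ≠ 0)]
  have h2 : b / 2 ^ k / 2 = b / 2 ^ (k + 1) := by
    rw [pow_succ]; exact Int.ediv_ediv_of_nonneg (by positivity)
  rw [h2]; ring

-- invariant: after m iterations A's state is the closed-form lists and prefix sums
theorem pv_main (b h : Int) : ∀ (m : Nat),
    (pvStep1 h)^[m] ([0], [pvX b (2 * h - 1) 0], 0, pvX b (2 * h - 1) 0)
      = (((pvT b (2 * h - 1) m).foldl pvStep2 (0, [0])).2,
         ((List.range (m + 1)).map (pvX b (2 * h - 1))).reverse,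
         ((pvT b (2 * h - 1) m).foldl pvStep2 (0, [0])).1,
         pvX b (2 * h - 1) m) := by
  intro m
  induction m with
  | zero => simp [pvT]
  | succ m ih =>
    rw [Function.iterate_succ_apply', ih]
    have hT : pvT b (2 * h - 1) (m + 1) = pvT b (2 * h - 1) m ++ [pvX b (2 * h - 1) (m + 1)] := by
      unfold pvT; rw [List.range_succ, List.map_append]; rfl
    have hL : List.range (m + 1 + 1) = List.range (m + 1) ++ [m + 1] := List.range_succ
    rw [hT, hL, List.foldl_append, List.map_append]
    simp only [pvStep1, pvStepA, pv_closed_step b h m, List.foldl_cons, List.foldl_nil,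
      pvStep2, List.map_cons, List.map_nil, List.reverse_append, List.reverse_cons,
      List.reverse_nil, List.nil_append, List.cons_append]

-- ===== VERDICT (by name: the statement is the Claim_ definition above) =====
theorem generate_scales_idx_spec : Claim_equal_generate_scales_idx := by
  intro length level halfLenFilter _
  unfold Spec_generate_scales_idx
  simp only [generate_scales_idx, generate_scales_idx_alt]
  have hlen : (PySem.List.pyRange 0 level 1).length = level.toNat := by
    rw [PySem.List.length_pyRange_one]; omega
  have hX0 : pvX (length - (2 * halfLenFilter - 1)) (2 * halfLenFilter - 1) 0 = length := by
    unfold pvX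
    rw [pow_zero, PySem.Int.floordiv_eq_ediv_of_pos (by norm_num : (0:Int) < 1), Int.ediv_one]
    ring
  have hA := pv_foldl_iter halfLenFilter (PySem.List.pyRange 0 level 1)
      ([0], [length], 0, length)
  rw [hlen] at hA
  have hA' := pv_main (length - (2 * halfLenFilter - 1)) halfLenFilter level.toNat
  rw [hX0] at hA'
  rw [hA, hA']
  have hmax : max level 0 = ((level.toNat : Int)) := by omega
  rw [hmax]
  have htl : (PySem.List.pyRange 0 ((level.toNat : Int) + 1) 1).map
      (fun k => PySem.Int.floordiv (length - (2 * halfLenFilter - 1)) (2 ^ k.toNat)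
        + (2 * halfLenFilter - 1))
      = (List.range (level.toNat + 1)).map
          (pvX (length - (2 * halfLenFilter - 1)) (2 * halfLenFilter - 1)) := by
    rw [PySem.List.pyRange_one]
    have h1 : (((level.toNat : Int)) + 1 - 0).toNat = level.toNat + 1 := by omega
    rw [h1, List.map_map]
    refine List.map_congr_left ?_
    intro k _
    simp [pvX]
  rw [htl]
  have htail : ((List.range (level.toNat + 1)).map
        (pvX (length - (2 * halfLenFilter - 1)) (2 * halfLenFilter - 1))).tail
      = pvT (length - (2 * halfLenFilter - 1)) (2 * halfLenFilter - 1) level.toNat := by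
    rw [List.range_succ_eq_map, List.map_cons, List.tail_cons, List.map_map]
    unfold pvT
    refine List.map_congr_left ?_
    intro i _
    simp [Function.comp, Nat.succ_eq_add_one]
  have hlast : PySem.List.pyGetD ((List.range (level.toNat + 1)).map
        (pvX (length - (2 * halfLenFilter - 1)) (2 * halfLenFilter - 1))) (-1) 0
      = pvX (length - (2 * halfLenFilter - 1)) (2 * halfLenFilter - 1) level.toNat := by
    rw [List.range_succ, List.map_append]
    exact PySem.List.pyGetD_neg_one_append_singleton ..
  rw [PySem.List.slice_from_one, htail, hlast]
  simp
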